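-- pv_equiv track=rewrite | github.com/palasangha/pala-platform | packages/agents/metadata-agent/tools/storage_extractor.py | _extract_from_metadata
-- ===== SOURCE A (Python) =====
-- from typing import Dict, Any, Optional
--
-- def _extract_from_metadata(metadata: Dict[str, Any]) -> Dict[str, str]:
--     """
--     Extract storage info from file metadata dictionary
--
--     Looks for keys like: archive_name, collection_id, box_number, folder_number
--     """
--     result = {
--         'archive_name': '',
--         'collection_name': '',
--         'box_number': '',
--         'folder_number': '',
--         'digital_repository': ''
--     }
--
--     # Direct mapping from metadata keys
--     key_mapping = {
--         'archive_name': 'archive_name',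
--         'archive_id': 'archive_name',
--         'collection_name': 'collection_name',
--         'collection_id': 'collection_name',
--         'box_number': 'box_number',
--         'box_id': 'box_number',
--         'folder_number': 'folder_number',
--         'folder_id': 'folder_number',
--         'repository_name': 'digital_repository',
--         'repository_url': 'digital_repository',
--     }
--
--     for metadata_key, result_key in key_mapping.items():
--         if metadata_key in metadata:
--             value = str(metadata[metadata_key])
--             if value and result[result_key] == '':
--                 result[result_key] = value
--
--     return result
-- ===== SOURCE B (Python) =====
-- _FIELDS = ('archive_name', 'collection_name', 'box_number', 'folder_number',
--            'digital_repository')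
--
-- # metadata key -> (result field, priority rank); lower rank wins
-- _PRIORITY = {
--     'archive_name': ('archive_name', 0), 'archive_id': ('archive_name', 1),
--     'collection_name': ('collection_name', 0), 'collection_id': ('collection_name', 1),
--     'box_number': ('box_number', 0), 'box_id': ('box_number', 1),
--     'folder_number': ('folder_number', 0), 'folder_id': ('folder_number', 1),
--     'repository_name': ('digital_repository', 0), 'repository_url': ('digital_repository', 1),
-- }
--
-- def _extract_from_metadata(metadata):
--     """Single scan over the metadata items, keeping the lowest-rank non-empty
--     source per field; then materialize the five fields."""
--     best = {}  # field -> (rank, value)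
--     for key, raw in metadata.items():
--         source = _PRIORITY.get(key)
--         if source is None:
--             continue
--         field, rank = source
--         value = str(raw)
--         if value == '':
--             continue
--         if field not in best or rank < best[field][0]:
--             best[field] = (rank, value)
--     return {f: best[f][1] if f in best else '' for f in _FIELDS}
-- ===== Notes on version B (the rewrite author's own statement) =====
-- stated objective: alternative
-- what changed: Instead of A's pass over the fixed 10-entry key->field mapping probing the metadata dict with an 'already filled' guard, B makes a single scan over the metadata items themselves, classifying each key through an inverted key->(field,rank) table and keeping the lowest-rank non-empty source per field, then materializes the five fields.
import Mathlib
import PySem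

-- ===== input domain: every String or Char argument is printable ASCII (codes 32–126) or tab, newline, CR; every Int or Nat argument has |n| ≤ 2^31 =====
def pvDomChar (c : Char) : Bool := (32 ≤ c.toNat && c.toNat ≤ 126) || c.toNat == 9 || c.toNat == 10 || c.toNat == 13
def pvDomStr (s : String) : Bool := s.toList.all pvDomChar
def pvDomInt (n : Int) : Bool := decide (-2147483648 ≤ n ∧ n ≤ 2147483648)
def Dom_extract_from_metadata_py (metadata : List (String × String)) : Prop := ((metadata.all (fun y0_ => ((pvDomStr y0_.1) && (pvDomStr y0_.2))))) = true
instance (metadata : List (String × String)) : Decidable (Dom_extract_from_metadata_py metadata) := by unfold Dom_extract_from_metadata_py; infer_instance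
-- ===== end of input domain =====

-- B replaces A's flat pass over the key->field mapping by a single scan over the metadata items keeping the lowest-rank non-empty source per field; alternative decomposition, same cost. Pre_ restricts to association lists with unique keys (the faithful images of Python dicts).


-- ===== PORT A =====
-- loop body of A's for-loop over key_mapping.items() (p = (metadata_key, result_key))
def pvStepA (md : PySem.Dict String String) (result : PySem.Dict String String)
    (p : String × String) : PySem.Dict String String :=
  match md.get? p.1 with
  | some value => if value ≠ "" ∧ result.getD p.2 "" = "" then result.insert p.2 value else result
  | none => result

def extract_from_metadata_py (metadata : List (String × String)) : List (String × String) :=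
  let result : PySem.Dict String String :=
    PySem.Dict.mk [("archive_name", ""), ("collection_name", ""), ("box_number", ""),
                   ("folder_number", ""), ("digital_repository", "")]
  let key_mapping : List (String × String) :=
    [("archive_name", "archive_name"), ("archive_id", "archive_name"),
     ("collection_name", "collection_name"), ("collection_id", "collection_name"),
     ("box_number", "box_number"), ("box_id", "box_number"),
     ("folder_number", "folder_number"), ("folder_id", "folder_number"),
     ("repository_name", "digital_repository"), ("repository_url", "digital_repository")]
  let md := PySem.Dict.mk metadata
  (key_mapping.foldl (pvStepA md) result).items

-- ===== PORT B =====
-- module constant _PRIORITY: metadata key -> (result field, priority rank)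
def pvPriorityMap : PySem.Dict String (String × Int) :=
  PySem.Dict.mk
    [("archive_name", ("archive_name", 0)), ("archive_id", ("archive_name", 1)),
     ("collection_name", ("collection_name", 0)), ("collection_id", ("collection_name", 1)),
     ("box_number", ("box_number", 0)), ("box_id", ("box_number", 1)),
     ("folder_number", ("folder_number", 0)), ("folder_id", ("folder_number", 1)),
     ("repository_name", ("digital_repository", 0)), ("repository_url", ("digital_repository", 1))]

-- module constant _FIELDS
def pvFields : List String :=
  ["archive_name", "collection_name", "box_number", "folder_number", "digital_repository"]

-- loop body of B's single for-loop over metadata.items()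
def pvStepB (best : PySem.Dict String (Int × String)) (p : String × String) :
    PySem.Dict String (Int × String) :=
  match pvPriorityMap.get? p.1 with
  | none => best
  | some (field, rank) =>
    let value := p.2
    if value = "" then best
    else
      match best.get? field with
      | none => best.insert field (rank, value)
      | some (r0, _) => if rank < r0 then best.insert field (rank, value) else best

def extract_from_metadata_py_alt (metadata : List (String × String)) : List (String × String) :=
  let best := ((PySem.Dict.mk metadata).items).foldl pvStepB PySem.Dict.empty
  pvFields.map (fun f => (f, match best.get? f with | some (_, v) => v | none => ""))

-- ===== PRECONDITION & SPEC =====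
-- Pre_ excludes association lists with duplicate keys: they are not the image of any Python
-- dict (the parameter's type), and the two ports read such a list differently.
def Pre_extract_from_metadata_py (metadata : List (String × String)) : Prop :=
  (metadata.map Prod.fst).Nodup
instance (metadata : List (String × String)) : Decidable (Pre_extract_from_metadata_py metadata) := by unfold Pre_extract_from_metadata_py; infer_instance

def pvWitness_extract_from_metadata_py : (List (String × String)) :=
  [("archive_id", "A-1"), ("box_number", "7"), ("note", "x")]

def Spec_extract_from_metadata_py (metadata : List (String × String)) (out : List (String × String)) : Prop := out = extract_from_metadata_py_alt metadata
instance (metadata : List (String × String)) (out : List (String × String)) : Decidable (Spec_extract_from_metadata_py metadata out) := by unfold Spec_extract_from_metadata_py; infer_instance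

-- ===== CLAIM (what is proved, stated in full; the proofs are below) =====
def Claim_equal_extract_from_metadata_py : Prop := ∀ (metadata : List (String × String)), Dom_extract_from_metadata_py metadata → Pre_extract_from_metadata_py metadata → Spec_extract_from_metadata_py metadata (extract_from_metadata_py metadata)

-- ===== LEMMAS AND PROOFS =====

-- first present non-empty value among the candidate keys, else "" (the common value both
-- programs compute per result field)
def pvPick (md : PySem.Dict String String) : List String → String
  | [] => ""
  | k :: ks =>
    match md.get? k with
    | some v => if v ≠ "" then v else pvPick md ks
    | none => pvPick md ks

-- the common target: what both programs return, field by field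
def pvTarget (metadata : List (String × String)) : List (String × String) :=
  let md := PySem.Dict.mk metadata
  [("archive_name", pvPick md ["archive_name", "archive_id"]),
   ("collection_name", pvPick md ["collection_name", "collection_id"]),
   ("box_number", pvPick md ["box_number", "box_id"]),
   ("folder_number", pvPick md ["folder_number", "folder_id"]),
   ("digital_repository", pvPick md ["repository_name", "repository_url"])]

-- ---- A side ----
-- processing the two mapping entries for one result key r, starting from a state whose
-- r-slot is still empty, either leaves the state alone (no valid source) or writes the pick
theorem pvStepA_pair (md d : PySem.Dict String String) (k1 k2 r : String)
    (hd : d.getD r "" = "") :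
    pvStepA md (pvStepA md d (k1, r)) (k2, r) =
      (if pvPick md [k1, k2] = "" then d else d.insert r (pvPick md [k1, k2])) := by
  simp only [pvStepA, pvPick]
  rcases h1 : md.get? k1 with _ | v1
  · rcases h2 : md.get? k2 with _ | v2
    · simp
    · by_cases hv2 : v2 = "" <;> simp [hv2, hd]
  · by_cases hv1 : v1 = ""
    · subst hv1
      rcases h2 : md.get? k2 with _ | v2
      · simp
      · by_cases hv2 : v2 = "" <;> simp [hv2, hd]
    · simp only [hd]
      rcases h2 : md.get? k2 with _ | v2
      · simp [hv1]
      · simp [hv1, PySem.Dict.getD_insert_self]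

theorem pvA_target (metadata : List (String × String)) :
    extract_from_metadata_py metadata = pvTarget metadata := by
  unfold extract_from_metadata_py pvTarget
  simp only [List.foldl_cons, List.foldl_nil]
  rw [pvStepA_pair (PySem.Dict.mk metadata) _ "archive_name" "archive_id" "archive_name" (by rfl)]
  rw [pvStepA_pair (PySem.Dict.mk metadata) _ "collection_name" "collection_id" "collection_name"
    (by split_ifs <;> rfl)]
  rw [pvStepA_pair (PySem.Dict.mk metadata) _ "box_number" "box_id" "box_number"
    (by split_ifs <;> rfl)]
  rw [pvStepA_pair (PySem.Dict.mk metadata) _ "folder_number" "folder_id" "folder_number"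
    (by split_ifs <;> rfl)]
  rw [pvStepA_pair (PySem.Dict.mk metadata) _ "repository_name" "repository_url" "digital_repository"
    (by split_ifs <;> rfl)]
  split_ifs with h1 h2 h3 h4 h5 <;> simp_all [PySem.Dict.items_insert, PySem.Dict.contains_insert]

-- ---- B side ----
-- the f-component of B's fold, as a fold over Option (rank, value)
def pvStep2 (k1 k2 : String) (s : Option (Int × String)) (p : String × String) :
    Option (Int × String) :=
  if p.1 = k1 then
    if p.2 = "" then s
    else match s with
         | none => some (0, p.2)
         | some (r0, _) => if (0 : Int) < r0 then some (0, p.2) else s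
  else if p.1 = k2 then
    if p.2 = "" then s
    else match s with
         | none => some (1, p.2)
         | some (r0, _) => if (1 : Int) < r0 then some (1, p.2) else s
  else s

-- enumeration of the priority dict
set_option maxRecDepth 10000 in
theorem pvPriority_char (k fl : String) (r : Int)
    (h : pvPriorityMap.get? k = some (fl, r)) :
    (k, fl, r) ∈ [("archive_name", "archive_name", (0:Int)), ("archive_id", "archive_name", 1),
      ("collection_name", "collection_name", 0), ("collection_id", "collection_name", 1),
      ("box_number", "box_number", 0), ("box_id", "box_number", 1),
      ("folder_number", "folder_number", 0), ("folder_id", "folder_number", 1),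
      ("repository_name", "digital_repository", 0), ("repository_url", "digital_repository", 1)] := by
  simp only [pvPriorityMap, PySem.Dict.get?_mk_cons] at h
  split_ifs at h with h1 h2 h3 h4 h5 h6 h7 h8 h9 h10 <;>
    simp only [beq_iff_eq] at * <;> subst_vars <;>
    simp_all [show ∀ x : String,
      ({items := []} : PySem.Dict String (String × Int)).get? x = none from fun _ => rfl]

-- B's dict fold projects, at field f, to the Option fold pvStep2
theorem pvProj (k1 k2 f : String)
    (H1 : pvPriorityMap.get? k1 = some (f, 0))
    (H2 : pvPriorityMap.get? k2 = some (f, 1))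
    (H3 : ∀ k fl r, pvPriorityMap.get? k = some (fl, r) → fl = f →
        (k = k1 ∧ r = 0) ∨ (k = k2 ∧ r = 1)) :
    ∀ (L : List (String × String)) (b : PySem.Dict String (Int × String)),
      (L.foldl pvStepB b).get? f = L.foldl (pvStep2 k1 k2) (b.get? f) := by
  have h12 : k1 ≠ k2 := by
    intro he; rw [he, H2] at H1; simp at H1
  have h21 : ¬ k2 = k1 := fun e => h12 e.symm
  intro L
  induction L with
  | nil => intro b; rfl
  | cons p L ih =>
    intro b
    simp only [List.foldl_cons, ih]
    congr 1
    rcases h : pvPriorityMap.get? p.1 with _ | ⟨fl, r⟩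
    · have hk1 : p.1 ≠ k1 := fun he => by rw [he, H1] at h; cases h
      have hk2 : p.1 ≠ k2 := fun he => by rw [he, H2] at h; cases h
      simp [pvStepB, pvStep2, h, hk1, hk2]
    · by_cases hf : fl = f
      · subst hf
        rcases H3 p.1 fl r h rfl with ⟨hk, hr⟩ | ⟨hk, hr⟩ <;> subst hr <;> rw [hk] at h <;>
        · by_cases hv : p.2 = "" <;>
            rcases hb : b.get? fl with _ | ⟨r0, v0⟩ <;>
            simp [pvStepB, pvStep2, h, hb, hv, hk, h21,
              PySem.Dict.get?_insert_self] <;>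
            split_ifs <;>
            simp_all [PySem.Dict.get?_insert_self]
      · have hk1 : p.1 ≠ k1 := fun he => by rw [he, H1] at h; cases h; exact hf rfl
        have hk2 : p.1 ≠ k2 := fun he => by rw [he, H2] at h; cases h; exact hf rfl
        rcases hb : b.get? fl with _ | ⟨r0, v0⟩ <;>
          simp [pvStepB, pvStep2, h, hb, hk1, hk2] <;>
          split_ifs <;>
          simp [PySem.Dict.get?_insert_of_ne _ _ (Ne.symm hf)]

-- second-choice combinator and the two-lookup pick
def pvSecond (o2 : Option String) : Option (Int × String) :=
  match o2 with
  | some w => if w = "" then none else some (1, w)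
  | none => none

def pvPick2 (o1 o2 : Option String) : Option (Int × String) :=
  match o1 with
  | some v => if v = "" then pvSecond o2 else some (0, v)
  | none => pvSecond o2

theorem pvLookup_none {L : List (String × String)} {x : String}
    (h : x ∉ L.map Prod.fst) : List.lookup x L = none := by
  induction L with
  | nil => rfl
  | cons p rest ih =>
    obtain ⟨k, v⟩ := p
    simp only [List.map_cons, List.mem_cons, not_or] at h
    have hb : (x == k) = false := beq_eq_false_iff_ne.mpr h.1
    simp [List.lookup, hb, ih h.2]

theorem pvAbsorb0 (k1 k2 : String) :
    ∀ (L : List (String × String)) (v : String),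
      L.foldl (pvStep2 k1 k2) (some (0, v)) = some (0, v) := by
  intro L
  induction L with
  | nil => intro v; rfl
  | cons p L ih =>
    intro v
    have hstep : pvStep2 k1 k2 (some (0, v)) p = some (0, v) := by
      simp only [pvStep2]
      split_ifs <;> simp_all
    simp [hstep, ih]

theorem pvFrom1 (k1 k2 : String) (h12 : k1 ≠ k2) :
    ∀ (L : List (String × String)) (v : String), (L.map Prod.fst).Nodup →
      L.foldl (pvStep2 k1 k2) (some (1, v)) =
        (match List.lookup k1 L with
         | some w => if w = "" then some (1, v) else some (0, w)
         | none => some (1, v)) := by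
  intro L
  induction L with
  | nil => intro v _; rfl
  | cons p L ih =>
    intro v hnd
    obtain ⟨p1, p2⟩ := p
    rw [List.map_cons, List.nodup_cons] at hnd
    by_cases h1 : p1 = k1
    · subst h1
      have hk1L : List.lookup p1 L = none := pvLookup_none hnd.1
      by_cases hv : p2 = ""
      · simp [List.foldl_cons, pvStep2, hv, List.lookup, ih v hnd.2, hk1L]
      · simp [List.foldl_cons, pvStep2, hv, List.lookup, pvAbsorb0]
    · have h1' : ¬ k1 = p1 := fun e => h1 e.symm
      by_cases hv : p2 = "" <;>
        by_cases h2 : p1 = k2 <;>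
          simp [List.foldl_cons, pvStep2, h1, h1', h2, hv, h12, Ne.symm h12,
            beq_eq_false_iff_ne.mpr h12, beq_eq_false_iff_ne.mpr h1',
            List.lookup, ih v hnd.2]

theorem pvChar (k1 k2 : String) (h12 : k1 ≠ k2) :
    ∀ (L : List (String × String)), (L.map Prod.fst).Nodup →
      L.foldl (pvStep2 k1 k2) none = pvPick2 (List.lookup k1 L) (List.lookup k2 L) := by
  intro L
  induction L with
  | nil => intro _; rfl
  | cons p L ih =>
    intro hnd
    obtain ⟨p1, p2⟩ := p
    rw [List.map_cons, List.nodup_cons] at hnd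
    by_cases h1 : p1 = k1
    · subst h1
      have hk1L : List.lookup p1 L = none := pvLookup_none hnd.1
      by_cases hv : p2 = ""
      · simp [List.foldl_cons, pvStep2, hv, List.lookup, Ne.symm h12, h12,
          beq_eq_false_iff_ne.mpr (Ne.symm h12), ih hnd.2, hk1L, pvPick2]
      · simp [List.foldl_cons, pvStep2, hv, List.lookup, Ne.symm h12, h12,
          beq_eq_false_iff_ne.mpr (Ne.symm h12), pvAbsorb0, pvPick2]
    · have h1' : ¬ k1 = p1 := fun e => h1 e.symm
      by_cases h2 : p1 = k2
      · subst h2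
        have hk2L : List.lookup p1 L = none := pvLookup_none hnd.1
        by_cases hv : p2 = ""
        · simp [List.foldl_cons, pvStep2, hv, h1, h1', beq_eq_false_iff_ne.mpr h1',
            List.lookup, ih hnd.2, hk2L, pvPick2, pvSecond]
        · simp [List.foldl_cons, pvStep2, hv, h1, h1', beq_eq_false_iff_ne.mpr h1',
            List.lookup, hk2L, pvFrom1 k1 p1 h1' L p2 hnd.2, pvPick2, pvSecond]
      · have h2' : ¬ k2 = p1 := fun e => h2 e.symm
        simp [List.foldl_cons, pvStep2, h1, h1', h2, h2', beq_eq_false_iff_ne.mpr h1',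
          beq_eq_false_iff_ne.mpr h2', List.lookup, ih hnd.2]

theorem pvLookup_eq_get? (l : List (String × String)) (x : String) :
    List.lookup x l = (PySem.Dict.mk l).get? x := by
  induction l with
  | nil => rfl
  | cons p rest ih =>
    obtain ⟨k, v⟩ := p
    rcases eq_or_ne k x with h | h
    · simp [List.lookup, PySem.Dict.get?_mk_cons, h]
    · simp [List.lookup, PySem.Dict.get?_mk_cons, h, beq_eq_false_iff_ne.mpr (Ne.symm h), ih]

theorem pvPick2_val (md : PySem.Dict String String) (k1 k2 : String) :
    (match pvPick2 (md.get? k1) (md.get? k2) with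
     | some (_, v) => v
     | none => "") = pvPick md [k1, k2] := by
  simp only [pvPick, pvPick2, pvSecond]
  rcases md.get? k1 with _ | v <;> rcases md.get? k2 with _ | w <;>
    simp <;> split_ifs <;> simp_all

-- one result field of B equals the pick (combining projection, characterization, lookup)
theorem pvB_field (metadata : List (String × String)) (k1 k2 f : String)
    (hpre : (metadata.map Prod.fst).Nodup)
    (H1 : pvPriorityMap.get? k1 = some (f, 0))
    (H2 : pvPriorityMap.get? k2 = some (f, 1))
    (H3 : ∀ k fl r, pvPriorityMap.get? k = some (fl, r) → fl = f →
        (k = k1 ∧ r = 0) ∨ (k = k2 ∧ r = 1)) :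
    (match (((PySem.Dict.mk metadata).items).foldl pvStepB PySem.Dict.empty).get? f with
     | some (_, v) => v
     | none => "") = pvPick (PySem.Dict.mk metadata) [k1, k2] := by
  have h12 : k1 ≠ k2 := by
    intro he; rw [he, H2] at H1; simp at H1
  have hitems : ((PySem.Dict.mk metadata).items) = metadata := rfl
  rw [pvProj k1 k2 f H1 H2 H3 ((PySem.Dict.mk metadata).items) PySem.Dict.empty]
  rw [hitems, PySem.Dict.get?_empty, pvChar k1 k2 h12 metadata hpre,
    ← pvPick2_val (PySem.Dict.mk metadata) k1 k2, pvLookup_eq_get?, pvLookup_eq_get?]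

theorem pvB_target (metadata : List (String × String))
    (hpre : (metadata.map Prod.fst).Nodup) :
    extract_from_metadata_py_alt metadata = pvTarget metadata := by
  unfold extract_from_metadata_py_alt pvTarget pvFields
  simp only [List.map_cons, List.map_nil]
  have H3 : ∀ f : String, ∀ k fl r, pvPriorityMap.get? k = some (fl, r) → fl = f →
      True := fun _ _ _ _ _ _ => trivial
  refine congrArg₂ _ ?_ (congrArg₂ _ ?_ (congrArg₂ _ ?_ (congrArg₂ _ ?_ (congrArg₂ _ ?_ rfl)))) <;>
    refine congrArg _ ?_
  · exact pvB_field metadata "archive_name" "archive_id" "archive_name" hpre (by decide) (by decide)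
      (fun k fl r h hf => by
        have hm := pvPriority_char k fl r h
        simp only [List.mem_cons, List.not_mem_nil, or_false, Prod.mk.injEq] at hm
        rcases hm with ⟨rfl,rfl,rfl⟩|⟨rfl,rfl,rfl⟩|⟨rfl,rfl,rfl⟩|⟨rfl,rfl,rfl⟩|⟨rfl,rfl,rfl⟩|⟨rfl,rfl,rfl⟩|⟨rfl,rfl,rfl⟩|⟨rfl,rfl,rfl⟩|⟨rfl,rfl,rfl⟩|⟨rfl,rfl,rfl⟩ <;>
          simp_all)
  · exact pvB_field metadata "collection_name" "collection_id" "collection_name" hpre (by decide)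
      (by decide)
      (fun k fl r h hf => by
        have hm := pvPriority_char k fl r h
        simp only [List.mem_cons, List.not_mem_nil, or_false, Prod.mk.injEq] at hm
        rcases hm with ⟨rfl,rfl,rfl⟩|⟨rfl,rfl,rfl⟩|⟨rfl,rfl,rfl⟩|⟨rfl,rfl,rfl⟩|⟨rfl,rfl,rfl⟩|⟨rfl,rfl,rfl⟩|⟨rfl,rfl,rfl⟩|⟨rfl,rfl,rfl⟩|⟨rfl,rfl,rfl⟩|⟨rfl,rfl,rfl⟩ <;>
          simp_all)
  · exact pvB_field metadata "box_number" "box_id" "box_number" hpre (by decide) (by decide)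
      (fun k fl r h hf => by
        have hm := pvPriority_char k fl r h
        simp only [List.mem_cons, List.not_mem_nil, or_false, Prod.mk.injEq] at hm
        rcases hm with ⟨rfl,rfl,rfl⟩|⟨rfl,rfl,rfl⟩|⟨rfl,rfl,rfl⟩|⟨rfl,rfl,rfl⟩|⟨rfl,rfl,rfl⟩|⟨rfl,rfl,rfl⟩|⟨rfl,rfl,rfl⟩|⟨rfl,rfl,rfl⟩|⟨rfl,rfl,rfl⟩|⟨rfl,rfl,rfl⟩ <;>
          simp_all)
  · exact pvB_field metadata "folder_number" "folder_id" "folder_number" hpre (by decide) (by decide)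
      (fun k fl r h hf => by
        have hm := pvPriority_char k fl r h
        simp only [List.mem_cons, List.not_mem_nil, or_false, Prod.mk.injEq] at hm
        rcases hm with ⟨rfl,rfl,rfl⟩|⟨rfl,rfl,rfl⟩|⟨rfl,rfl,rfl⟩|⟨rfl,rfl,rfl⟩|⟨rfl,rfl,rfl⟩|⟨rfl,rfl,rfl⟩|⟨rfl,rfl,rfl⟩|⟨rfl,rfl,rfl⟩|⟨rfl,rfl,rfl⟩|⟨rfl,rfl,rfl⟩ <;>
          simp_all)
  · exact pvB_field metadata "repository_name" "repository_url" "digital_repository" hpre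
      (by decide) (by decide)
      (fun k fl r h hf => by
        have hm := pvPriority_char k fl r h
        simp only [List.mem_cons, List.not_mem_nil, or_false, Prod.mk.injEq] at hm
        rcases hm with ⟨rfl,rfl,rfl⟩|⟨rfl,rfl,rfl⟩|⟨rfl,rfl,rfl⟩|⟨rfl,rfl,rfl⟩|⟨rfl,rfl,rfl⟩|⟨rfl,rfl,rfl⟩|⟨rfl,rfl,rfl⟩|⟨rfl,rfl,rfl⟩|⟨rfl,rfl,rfl⟩|⟨rfl,rfl,rfl⟩ <;>
          simp_all)

-- ===== VERDICT (by name: the statement is the Claim_ definition above) =====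
theorem extract_from_metadata_py_spec : Claim_equal_extract_from_metadata_py := by
  intro metadata _ hpre
  unfold Spec_extract_from_metadata_py
  rw [pvA_target metadata, pvB_target metadata hpre]
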